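-- pv_equiv track=rewrite | github.com/narunraman/quickscope | quickscope/simulation/default/metrics.py | _parse_tuple_elements
-- ===== SOURCE A (Python) =====
-- def _parse_tuple_elements(s: str) -> list[str]:
--     """
--     Parse a tuple/list string like "(a, b)" or "[a, b]" into element strings ["a", "b"].
--     Handles nested parentheses/brackets within elements.
--     """
--     s = s.strip()
--
--     # Remove outer parentheses or brackets if present
--     if (s.startswith("(") and s.endswith(")")) or (
--         s.startswith("[") and s.endswith("]")
--     ):
--         s = s[1:-1]
--
--     # Split by comma, but respect nested parentheses/brackets
--     elements = []
--     current = []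
--     depth = 0
--
--     for char in s:
--         if char in "([":
--             depth += 1
--             current.append(char)
--         elif char in ")]":
--             depth -= 1
--             current.append(char)
--         elif char == "," and depth == 0:
--             elements.append("".join(current).strip())
--             current = []
--         else:
--             current.append(char)
--
--     if current:
--         elements.append("".join(current).strip())
--
--     return [e for e in elements if e]
-- ===== SOURCE B (Python) =====
-- def _parse_tuple_elements(s: str) -> list[str]:
--     """
--     Parse a tuple/list string like "(a, b)" or "[a, b]" into element strings ["a", "b"].
--     Split-then-merge: cut on every comma first, then glue pieces back together while
--     the running bracket balance is nonzero, committing an element whenever it is zero.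
--     """
--     s = s.strip()
--
--     # Remove outer parentheses or brackets if present
--     if (s.startswith("(") and s.endswith(")")) or (
--         s.startswith("[") and s.endswith("]")
--     ):
--         s = s[1:-1]
--
--     out = []
--     pending = None  # pieces joined so far, waiting for the balance to close
--     depth = 0
--
--     for part in s.split(","):
--         pending = part if pending is None else pending + "," + part
--         depth += (
--             part.count("(") + part.count("[") - part.count(")") - part.count("]")
--         )
--         if depth == 0:
--             element = pending.strip()
--             if element:
--                 out.append(element)
--             pending = None
--
--     if pending is not None:
--         element = pending.strip()
--         if element:
--             out.append(element)
--
--     return out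
-- ===== Notes on version B (the rewrite author's own statement) =====
-- stated objective: faster
-- what changed: Instead of a single character-by-character scan that grows a char buffer and splits at depth-0 commas, B first cuts the string on every comma with str.split, then glues pieces back together while a running bracket balance (computed from per-piece str.count bracket counts) is nonzero, committing a stripped element whenever the balance reaches zero.
import Mathlib
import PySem

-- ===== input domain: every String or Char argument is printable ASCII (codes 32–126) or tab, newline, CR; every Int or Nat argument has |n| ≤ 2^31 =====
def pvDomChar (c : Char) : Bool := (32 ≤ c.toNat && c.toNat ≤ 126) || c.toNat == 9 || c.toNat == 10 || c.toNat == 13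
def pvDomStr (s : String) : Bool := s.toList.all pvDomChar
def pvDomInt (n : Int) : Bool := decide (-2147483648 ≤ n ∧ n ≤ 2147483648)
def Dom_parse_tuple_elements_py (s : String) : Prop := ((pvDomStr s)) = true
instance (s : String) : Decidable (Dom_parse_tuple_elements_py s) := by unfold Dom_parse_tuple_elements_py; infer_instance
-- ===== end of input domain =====

-- B replaces A's single char-by-char scan (buffer + depth, split at depth-0 commas) by
-- split-on-comma then merge-while-unbalanced; C-level str.split/str.count make B measurably faster.


-- ===== PORT A =====
-- the shared first lines of both Pythons: s.strip(), then drop matching outer () / []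
def pvPre (s : String) : List Char :=
  let cs := PySem.Chars.strip s.toList
  if (PySem.Chars.startswith cs ['('] && PySem.Chars.endswith cs [')']) ||
     (PySem.Chars.startswith cs ['['] && PySem.Chars.endswith cs [']']) then
    PySem.Chars.slice cs (some 1) (some (-1))
  else cs

-- one iteration of A's for-char loop: state = (elements, current, depth)
def pvStepA (st : List String × List Char × Int) (c : Char) : List String × List Char × Int :=
  if c == '(' || c == '[' then (st.1, st.2.1 ++ [c], st.2.2 + 1)
  else if c == ')' || c == ']' then (st.1, st.2.1 ++ [c], st.2.2 - 1)
  else if c == ',' && st.2.2 == 0 then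
    (st.1 ++ [String.ofList (PySem.Chars.strip st.2.1)], [], st.2.2)
  else (st.1, st.2.1 ++ [c], st.2.2)

def parse_tuple_elements_py (s : String) : List String :=
  let cs := pvPre s
  let st := cs.foldl pvStepA ([], [], 0)
  let elements := if st.2.1 ≠ [] then st.1 ++ [String.ofList (PySem.Chars.strip st.2.1)] else st.1
  elements.filter (fun e => e ≠ "")

-- ===== PORT B =====
-- bracket balance contributed by one comma-free piece (the four .count calls of Source B)
def pvBal (part : List Char) : Int :=
  (PySem.Chars.count part ['('] : Int) + (PySem.Chars.count part ['['] : Int)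
    - (PySem.Chars.count part [')'] : Int) - (PySem.Chars.count part [']'] : Int)

-- one iteration of B's for-part loop: state = (out, pending, depth)
def pvStepB (st : List String × Option (List Char) × Int) (part : List Char) :
    List String × Option (List Char) × Int :=
  let pending := match st.2.1 with
    | none => part
    | some b => b ++ [','] ++ part
  let depth := st.2.2 + pvBal part
  if depth == 0 then
    let e := PySem.Chars.strip pending
    (if e ≠ [] then st.1 ++ [String.ofList e] else st.1, none, depth)
  else (st.1, some pending, depth)

def parse_tuple_elements_py_alt (s : String) : List String :=
  let cs := pvPre s
  let st := (PySem.Chars.splitOn cs [',']).foldl pvStepB ([], none, 0)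
  match st.2.1 with
  | some b =>
      let e := PySem.Chars.strip b
      if e ≠ [] then st.1 ++ [String.ofList e] else st.1
  | none => st.1

-- ===== PRECONDITION & SPEC =====
def Spec_parse_tuple_elements_py (s : String) (out : List String) : Prop := out = parse_tuple_elements_py_alt s
instance (s : String) (out : List String) : Decidable (Spec_parse_tuple_elements_py s out) := by unfold Spec_parse_tuple_elements_py; infer_instance

-- ===== CLAIM (what is proved, stated in full; the proofs are below) =====
def Claim_equal_parse_tuple_elements_py : Prop := ∀ (s : String), Dom_parse_tuple_elements_py s → Spec_parse_tuple_elements_py s (parse_tuple_elements_py s)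

-- ===== LEMMAS AND PROOFS =====

def pvSplit : List Char → List Char × List (List Char)
  | [] => ([], [])
  | c :: l =>
    let r := pvSplit l
    if c = ',' then ([], r.1 :: r.2) else (c :: r.1, r.2)


theorem pvSplit_join (l : List Char) :
    (pvSplit l).1 ++ ((pvSplit l).2.map (fun q => ',' :: q)).flatten = l := by
  induction l with
  | nil => rfl
  | cons c l ih =>
    by_cases h : c = ','
    · simp [pvSplit, h]
      simpa using ih
    · simp [pvSplit, h]
      simpa using ih

theorem pvSplit_comma_free (l : List Char) :
    ',' ∉ (pvSplit l).1 ∧ ∀ q ∈ (pvSplit l).2, ',' ∉ q := by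
  induction l with
  | nil => simp [pvSplit]
  | cons c l ih =>
    by_cases h : c = ','
    · simp [pvSplit, h]
      exact ⟨ih.1, ih.2⟩
    · simp [pvSplit, h]
      exact ⟨⟨fun hc => h hc.symm, ih.1⟩, ih.2⟩

theorem pvSplitOn_go (l : List Char) :
    ∀ (fuel : Nat) (cur : List Char) (acc : List (List Char)), l.length ≤ fuel →
      PySem.Chars.splitOn.go [','] fuel l cur acc =
        acc.reverse ++ ((cur.reverse ++ (pvSplit l).1) :: (pvSplit l).2) := by
  induction l with
  | nil =>
    intro fuel cur acc _
    cases fuel <;> simp [PySem.Chars.splitOn.go, pvSplit]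
  | cons c l ih =>
    intro fuel cur acc hf
    cases fuel with
    | zero => simp at hf
    | succ fuel =>
      by_cases h : c = ','
      · subst h
        rw [show PySem.Chars.splitOn.go [','] (fuel+1) (','::l) cur acc =
            PySem.Chars.splitOn.go [','] fuel l [] (cur.reverse :: acc) from by
          simp [PySem.Chars.splitOn.go, List.isPrefixOf]]
        rw [ih fuel [] (cur.reverse :: acc) (by simpa using hf)]
        simp [pvSplit]
      · rw [show PySem.Chars.splitOn.go [','] (fuel+1) (c::l) cur acc =
            PySem.Chars.splitOn.go [','] fuel l (c :: cur) acc from by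
          have h' : ¬(',' = c) := fun hc => h hc.symm
          simp [PySem.Chars.splitOn.go, List.isPrefixOf, h']]
        rw [ih fuel (c :: cur) acc (by simpa using hf)]
        simp [pvSplit, h]

theorem pvSplitOn_eq (l : List Char) :
    PySem.Chars.splitOn l [','] = (pvSplit l).1 :: (pvSplit l).2 := by
  have := pvSplitOn_go l (l.length + 1) [] [] (by omega)
  simpa [PySem.Chars.splitOn] using this

theorem pvCount_go (c : Char) (l : List Char) :
    ∀ (fuel : Nat) (acc : Nat), l.length ≤ fuel →
      PySem.Chars.count.go [c] fuel l acc = acc + l.count c := by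
  induction l with
  | nil => intro fuel acc _; cases fuel <;> simp [PySem.Chars.count.go]
  | cons x l ih =>
    intro fuel acc hf
    cases fuel with
    | zero => simp at hf
    | succ fuel =>
      by_cases h : x = c
      · subst h
        rw [show PySem.Chars.count.go [x] (fuel+1) (x::l) acc =
            PySem.Chars.count.go [x] fuel l (acc+1) from by
          simp [PySem.Chars.count.go, List.isPrefixOf]]
        rw [ih fuel (acc+1) (by simpa using hf)]
        simp; omega
      · rw [show PySem.Chars.count.go [c] (fuel+1) (x::l) acc =
            PySem.Chars.count.go [c] fuel l acc from by
          have h' : ¬(c = x) := fun hc => h hc.symm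
          simp [PySem.Chars.count.go, List.isPrefixOf, h']]
        rw [ih fuel acc (by simpa using hf)]
        simp [h]

theorem pvCount_single (c : Char) (l : List Char) :
    PySem.Chars.count l [c] = l.count c := by
  simpa [PySem.Chars.count] using pvCount_go c l l.length 0 (le_refl _)


def pvDelta (c : Char) : Int :=
  if c = '(' ∨ c = '[' then 1 else if c = ')' ∨ c = ']' then -1 else 0

theorem pvBal_eq (q : List Char) : pvBal q = (q.map pvDelta).sum := by
  simp only [pvBal, pvCount_single]
  induction q with
  | nil => simp
  | cons c q ih =>
    simp only [List.count_cons, List.map_cons, List.sum_cons]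
    by_cases h1 : c = '(' <;> by_cases h2 : c = '[' <;> by_cases h3 : c = ')' <;>
      by_cases h4 : c = ']' <;>
      simp_all [pvDelta] <;> omega

theorem pvLoopA_comma_free (q : List Char) (h : ',' ∉ q) (el : List String)
    (cur : List Char) (d : Int) :
    q.foldl pvStepA (el, cur, d) = (el, cur ++ q, d + (q.map pvDelta).sum) := by
  induction q generalizing cur d with
  | nil => simp
  | cons c q ih =>
    have hc : c ≠ ',' := fun hc => h (by simp [hc])
    have hq : ',' ∉ q := fun hq => h (by simp [hq])
    simp only [List.foldl_cons]
    by_cases h1 : c = '(' ∨ c = '['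
    · have : pvStepA (el, cur, d) c = (el, cur ++ [c], d + 1) := by
        rcases h1 with h1 | h1 <;> simp [pvStepA, h1]
      rw [this, ih hq]
      simp [pvDelta, h1]; ring
    · by_cases h2 : c = ')' ∨ c = ']'
      · have : pvStepA (el, cur, d) c = (el, cur ++ [c], d - 1) := by
          rcases h2 with h2 | h2 <;> simp [pvStepA, h2]
        rw [this, ih hq]
        simp [pvDelta, h1, h2]
        omega
      · have : pvStepA (el, cur, d) c = (el, cur ++ [c], d) := by
          push Not at h1 h2
          simp [pvStepA, h1.1, h1.2, h2.1, h2.2, hc]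
        rw [this, ih hq]
        simp [pvDelta, h1, h2]
        try omega

def pvFilt (e : List Char) : List String := if e ≠ [] then [String.ofList e] else []

def pvFinB (st : List String × Option (List Char) × Int) : List String :=
  match st.2.1 with
  | some b =>
      let e := PySem.Chars.strip b
      if e ≠ [] then st.1 ++ [String.ofList e] else st.1
  | none => st.1

def pvFinA (st : List String × List Char × Int) : List String :=
  (if st.2.1 ≠ [] then st.1 ++ [String.ofList (PySem.Chars.strip st.2.1)] else st.1).filter
    (fun e => e ≠ "")

def pvRel (el : List String) (cur : List Char) (out : List String)
    (pending : Option (List Char)) (d : Int) : Prop :=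
  (pending = none ∧ d = 0 ∧
      out = el.filter (fun e => e ≠ "") ++ pvFilt (PySem.Chars.strip cur)) ∨
  (∃ b, pending = some b ∧ b = cur ∧ d ≠ 0 ∧ out = el.filter (fun e => e ≠ ""))

theorem pvFilt_append (out : List String) (e : List Char) :
    (if e ≠ [] then out ++ [String.ofList e] else out) = out ++ pvFilt e := by
  by_cases h : e = [] <;> simp [pvFilt, h]

theorem pvOfList_ne_empty_iff (e : List Char) : (String.ofList e ≠ "") ↔ e ≠ [] := by
  constructor
  · intro h he; exact h (by simp [he])
  · intro h hs
    exact h (by simpa using congrArg String.toList hs)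

theorem pvFilter_append_one (el : List String) (e : List Char) :
    (el ++ [String.ofList e]).filter (fun x => x ≠ "") =
      el.filter (fun x => x ≠ "") ++ pvFilt e := by
  by_cases h : e = []
  · simp [pvFilt, h]
  · simp [pvFilt, h, (pvOfList_ne_empty_iff e).2 h]

theorem pvStrip_nil : PySem.Chars.strip [] = [] := by decide

theorem pvFinA_eq (el : List String) (cur : List Char) (d : Int) :
    pvFinA (el, cur, d) = el.filter (fun e => e ≠ "") ++ pvFilt (PySem.Chars.strip cur) := by
  by_cases h : cur = []
  · simp [pvFinA, h, pvStrip_nil, pvFilt]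
  · simp only [pvFinA]
    simpa [h] using pvFilter_append_one el (PySem.Chars.strip cur)

theorem pvStepA_comma_zero (el : List String) (cur : List Char) :
    pvStepA (el, cur, 0) ',' = (el ++ [String.ofList (PySem.Chars.strip cur)], [], 0) := by
  simp [pvStepA]

theorem pvStepA_comma_ne (el : List String) (cur : List Char) (d : Int) (h : d ≠ 0) :
    pvStepA (el, cur, d) ',' = (el, cur ++ [','], d) := by
  simp [pvStepA, h]

theorem pvMain (ps : List (List Char)) :
    ∀ (el out : List String) (cur : List Char) (pending : Option (List Char)) (d : Int),
      (∀ q ∈ ps, ',' ∉ q) → pvRel el cur out pending d →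
      pvFinA (((ps.map (fun q => ',' :: q)).flatten).foldl pvStepA (el, cur, d)) =
        pvFinB (ps.foldl pvStepB (out, pending, d)) := by
  induction ps with
  | nil =>
    intro el out cur pending d _ hrel
    rcases hrel with ⟨hp, hd, ho⟩ | ⟨b, hp, hb, hd, ho⟩
    · simp [hp, ho, pvFinB, pvFinA_eq]
    · subst hb
      by_cases hsb : PySem.Chars.strip b = [] <;>
        simp [hp, ho, pvFinB, pvFinA_eq, pvFilt, hsb]
  | cons q ps ih =>
    intro el out cur pending d hcf hrel
    have hq : ',' ∉ q := hcf q (by simp)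
    have hps : ∀ r ∈ ps, ',' ∉ r := fun r hr => hcf r (by simp [hr])
    simp only [List.map_cons, List.flatten_cons, List.foldl_append, List.foldl_cons]
    rcases hrel with ⟨hp, hd, ho⟩ | ⟨b, hp, hb, hd, ho⟩
    · -- pending = none, d = 0: A splits at the comma
      subst hd
      rw [hp, pvStepA_comma_zero, pvLoopA_comma_free q hq]
      have hstep : pvStepB (out, none, 0) q =
          (if 0 + pvBal q == 0 then
            (if PySem.Chars.strip q ≠ [] then out ++ [String.ofList (PySem.Chars.strip q)] else out,
              none, 0 + pvBal q)
          else (out, some q, 0 + pvBal q)) := by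
        simp only [pvStepB]
      by_cases hz : (0 : Int) + pvBal q = 0
      · rw [hstep, if_pos (by simpa using hz)]
        rw [show (0 : Int) + (q.map pvDelta).sum = 0 + pvBal q by rw [pvBal_eq]]
        exact ih _ _ _ _ _ hps (Or.inl ⟨rfl, hz, by
          rw [pvFilt_append, ho, pvFilter_append_one]
          simp⟩)
      · rw [hstep, if_neg (by simpa using hz)]
        rw [show (0 : Int) + (q.map pvDelta).sum = 0 + pvBal q by rw [pvBal_eq]]
        exact ih _ _ _ _ _ hps (Or.inr ⟨q, rfl, rfl, hz, by
          rw [ho, pvFilter_append_one]⟩)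
    · -- pending = some b = b, d ≠ 0: A keeps the comma in the buffer
      subst hb
      rw [hp, pvStepA_comma_ne el b d hd, pvLoopA_comma_free q hq]
      have hstep : pvStepB (out, some b, d) q =
          (if d + pvBal q == 0 then
            (if PySem.Chars.strip (b ++ [','] ++ q) ≠ [] then
              out ++ [String.ofList (PySem.Chars.strip (b ++ [','] ++ q))] else out,
              none, d + pvBal q)
          else (out, some (b ++ [','] ++ q), d + pvBal q)) := by
        simp only [pvStepB]
      by_cases hz : d + pvBal q = 0
      · rw [hstep, if_pos (by simpa using hz)]
        rw [show d + (q.map pvDelta).sum = d + pvBal q by rw [pvBal_eq]]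
        refine ih _ _ _ _ _ hps (Or.inl ⟨rfl, hz, ?_⟩)
        rw [pvFilt_append, ho]
      · rw [hstep, if_neg (by simpa using hz)]
        rw [show d + (q.map pvDelta).sum = d + pvBal q by rw [pvBal_eq]]
        exact ih _ _ _ _ _ hps (Or.inr ⟨_, rfl, by simp, hz, ho⟩)
theorem pvCore (cs : List Char) :
    pvFinA (cs.foldl pvStepA ([], [], 0)) =
      pvFinB ((PySem.Chars.splitOn cs [',']).foldl pvStepB ([], none, 0)) := by
  obtain ⟨h1, h2⟩ := pvSplit_comma_free cs
  rw [pvSplitOn_eq]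
  conv_lhs => rw [show cs = (pvSplit cs).1 ++ ((pvSplit cs).2.map (fun q => ',' :: q)).flatten from (pvSplit_join cs).symm]
  rw [List.foldl_append, pvLoopA_comma_free _ h1, List.foldl_cons]
  have hstep : pvStepB ([], none, 0) (pvSplit cs).1 =
      (if (0 : Int) + pvBal (pvSplit cs).1 == 0 then
        (if PySem.Chars.strip (pvSplit cs).1 ≠ [] then
          ([] : List String) ++ [String.ofList (PySem.Chars.strip (pvSplit cs).1)] else [],
          none, 0 + pvBal (pvSplit cs).1)
      else ([], some (pvSplit cs).1, 0 + pvBal (pvSplit cs).1)) := by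
    simp only [pvStepB]
  by_cases hz : (0 : Int) + pvBal (pvSplit cs).1 = 0
  · rw [hstep, if_pos (by simpa using hz)]
    rw [show (0 : Int) + ((pvSplit cs).1.map pvDelta).sum = 0 + pvBal (pvSplit cs).1 by
      rw [pvBal_eq]]
    refine pvMain _ _ _ _ _ _ h2 (Or.inl ⟨rfl, hz, ?_⟩)
    rw [pvFilt_append]
    simp
  · rw [hstep, if_neg (by simpa using hz)]
    rw [show (0 : Int) + ((pvSplit cs).1.map pvDelta).sum = 0 + pvBal (pvSplit cs).1 by
      rw [pvBal_eq]]
    exact pvMain _ _ _ _ _ _ h2 (Or.inr ⟨_, rfl, by simp, hz, rfl⟩)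

-- ===== VERDICT (by name: the statement is the Claim_ definition above) =====
theorem parse_tuple_elements_py_spec : Claim_equal_parse_tuple_elements_py := by
  intro s _
  unfold Spec_parse_tuple_elements_py parse_tuple_elements_py parse_tuple_elements_py_alt
  simpa [pvFinA, pvFinB] using pvCore (pvPre s)
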